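-- pv_equiv track=rewrite | github.com/Hulyamr13/hackerrank | Jim and the Challenge.py | calculate_ss
-- ===== SOURCE A (Python) =====
-- MOD = 1000000009
--
-- def calculate_ss(X, d):
--     ss = 0
--     for k in range(d):
--         sorted_X = sorted(X, key=lambda x: x[k + 1])
--         HX = list(zip(*sorted_X))
--         hjxj = 0
--         hj = 0
--         h = HX[0]
--         x = HX[k + 1]
--         for i in range(len(X) - 2, -1, -1):
--             hj += h[i + 1]
--             hjxj += h[i + 1] * x[i + 1]
--             ss = (ss + h[i] * hjxj - h[i] * x[i] * hj) % MOD
--     return ss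
-- ===== SOURCE B (Python) =====
-- MOD = 1000000009
--
-- def calculate_ss(X, d):
--     total = 0
--     for k in range(d):
--         seen = []
--         for r in X:
--             h, x = r[0], r[k + 1]
--             for h2, x2 in seen:
--                 total += h * h2 * abs(x - x2)
--             seen.append((h, x))
--     return total % MOD
-- ===== Notes on version B (the rewrite author's own statement) =====
-- stated objective: alternative
-- what changed: B drops A's sort-then-backward-suffix-accumulator pass entirely: per dimension it enumerates all unordered pairs directly with a growing 'seen' list, adding h*h2*abs(x-x2) for each pair, and reduces mod MOD once at the end; correctness rests on the identity that the sorted telescoped sum equals the pairwise absolute-difference sum.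
import Mathlib
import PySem

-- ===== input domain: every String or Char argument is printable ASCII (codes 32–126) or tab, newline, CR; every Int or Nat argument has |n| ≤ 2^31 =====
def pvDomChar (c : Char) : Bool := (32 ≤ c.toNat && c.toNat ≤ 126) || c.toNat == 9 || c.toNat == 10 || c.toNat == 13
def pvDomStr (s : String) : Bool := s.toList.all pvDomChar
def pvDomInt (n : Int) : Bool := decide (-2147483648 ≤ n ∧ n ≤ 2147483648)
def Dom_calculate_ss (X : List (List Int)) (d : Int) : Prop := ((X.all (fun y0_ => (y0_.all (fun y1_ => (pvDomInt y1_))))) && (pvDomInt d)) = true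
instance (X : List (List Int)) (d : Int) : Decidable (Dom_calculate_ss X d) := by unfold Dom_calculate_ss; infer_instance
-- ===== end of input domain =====

-- B replaces A's sort-then-backward-suffix-accumulator pass by a direct brute-force enumeration
-- of all unordered pairs (a growing 'seen' list, h*h2*|x-x2| per pair, no sorting), reduced mod
-- MOD once at the end; same results, a different algorithm ("alternative", not faster).

-- ===== PORT A =====
-- list(zip(*rows)): the list of columns, truncated to the shortest row (exact Python zip semantics)
def pvCols (rows : List (List Int)) : List (List Int) :=
  (List.range ((rows.map List.length).min?.getD 0)).map (fun i => rows.map (fun r => r.getD i 0))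

-- the body of A's inner 'for i in range(len(X)-2, -1, -1)' loop; state = (hj, hjxj, ss)
def stepA (h x : List Int) (st : Int × Int × Int) (i : Int) : Int × Int × Int :=
  let hj := st.1 + PySem.List.pyGetD h (i + 1) 0
  let hjxj := st.2.1 + PySem.List.pyGetD h (i + 1) 0 * PySem.List.pyGetD x (i + 1) 0
  (hj, hjxj,
    PySem.Int.mod (st.2.2 + PySem.List.pyGetD h i 0 * hjxj
      - PySem.List.pyGetD h i 0 * PySem.List.pyGetD x i 0 * hj) 1000000009)

def calculate_ss (X : List (List Int)) (d : Int) : Int :=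
  (PySem.List.pyRange 0 d 1).foldl (fun ss k =>
    let sortedX := PySem.List.sorted X (fun r => PySem.List.pyGetD r (k + 1) 0)
    let HX := pvCols sortedX
    let h := PySem.List.pyGetD HX 0 []
    let x := PySem.List.pyGetD HX (k + 1) []
    ((PySem.List.pyRange ((X.length : Int) - 2) (-1) (-1)).foldl (stepA h x) (0, 0, ss)).2.2) 0

-- ===== PORT B =====
-- the weight of one pair: h * h2 * abs(x - x2)
def pw (p q : Int × Int) : Int := p.1 * q.1 * |p.2 - q.2|

-- the body of B's 'for r in X' loop with its inner 'for h2, x2 in seen' loop; state = (total, seen)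
def stepP (st : Int × List (Int × Int)) (p : Int × Int) : Int × List (Int × Int) :=
  (st.2.foldl (fun t q => t + pw p q) st.1, st.2 ++ [p])

def stepB (k : Int) (st : Int × List (Int × Int)) (r : List Int) : Int × List (Int × Int) :=
  stepP st (PySem.List.pyGetD r 0 0, PySem.List.pyGetD r (k + 1) 0)

def calculate_ss_alt (X : List (List Int)) (d : Int) : Int :=
  PySem.Int.mod
    ((PySem.List.pyRange 0 d 1).foldl (fun total k =>
      (X.foldl (stepB k) (total, [])).1) 0)
    1000000009

-- ===== PRECONDITION & SPEC =====
-- Pre_ excludes exactly the inputs on which A raises IndexError: d ≥ 1 with X empty (HX[0]) or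
-- with some row shorter than d+1 entries (the key lambda / HX[k+1]).
def Pre_calculate_ss (X : List (List Int)) (d : Int) : Prop :=
  d ≤ 0 ∨ (X ≠ [] ∧ ∀ r ∈ X, d + 1 ≤ (r.length : Int))
instance (X : List (List Int)) (d : Int) : Decidable (Pre_calculate_ss X d) := by
  unfold Pre_calculate_ss; infer_instance

def pvWitness_calculate_ss : List (List Int) × Int := ([[1, 2], [3, 4], [2, -1]], 1)

def Spec_calculate_ss (X : List (List Int)) (d : Int) (out : Int) : Prop := out = calculate_ss_alt X d
instance (X : List (List Int)) (d : Int) (out : Int) : Decidable (Spec_calculate_ss X d out) := by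
  unfold Spec_calculate_ss; infer_instance

-- ===== CLAIM (what is proved, stated in full; the proofs are below) =====
def Claim_equal_calculate_ss : Prop := ∀ (X : List (List Int)) (d : Int), Dom_calculate_ss X d → Pre_calculate_ss X d → Spec_calculate_ss X d (calculate_ss X d)

-- ===== LEMMAS AND PROOFS =====

def sumH (ps : List (Int × Int)) : Int := (ps.map Prod.fst).sum
def sumHX (ps : List (Int × Int)) : Int := (ps.map (fun p => p.1 * p.2)).sum

-- A's per-dimension total, in the (h, x) order of the sorted list (telescoped form)
def Fsum : List (Int × Int) → Int
  | [] => 0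
  | p :: rest => p.1 * sumHX rest - p.1 * p.2 * sumH rest + Fsum rest

-- B's per-dimension total: the sum of pw over all unordered pairs, in list order
def pairSum : List (Int × Int) → Int
  | [] => 0
  | p :: rest => (rest.map (pw p)).sum + pairSum rest

lemma pw_comm (p q : Int × Int) : pw p q = pw q p := by
  unfold pw; rw [abs_sub_comm]; ring

lemma pairSum_perm {l₁ l₂ : List (Int × Int)} (h : l₁.Perm l₂) : pairSum l₁ = pairSum l₂ := by
  induction h with
  | nil => rfl
  | cons p h ih => simp only [pairSum, ih, (h.map (pw p)).sum_eq]
  | swap p q l =>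
      show pairSum (q :: p :: l) = pairSum (p :: q :: l)
      simp only [pairSum, List.map_cons, List.sum_cons]
      rw [pw_comm q p]; ring
  | trans _ _ ih1 ih2 => exact ih1.trans ih2

lemma map_pw_of_le (p : Int × Int) (rest : List (Int × Int)) (h : ∀ q ∈ rest, p.2 ≤ q.2) :
    ((rest.map (pw p)).sum) = p.1 * sumHX rest - p.1 * p.2 * sumH rest := by
  induction rest with
  | nil => simp [sumH, sumHX]
  | cons q t ih =>
      have hq : p.2 ≤ q.2 := h q List.mem_cons_self
      simp only [List.map_cons, List.sum_cons, sumH, sumHX] at *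
      rw [ih (fun r hr => h r (List.mem_cons_of_mem q hr))]
      unfold pw
      rw [abs_sub_comm, abs_of_nonneg (by omega : (0:Int) ≤ q.2 - p.2)]
      ring

lemma Fsum_eq_pairSum (ps : List (Int × Int)) (h : ps.Pairwise (fun p q => p.2 ≤ q.2)) :
    Fsum ps = pairSum ps := by
  induction ps with
  | nil => rfl
  | cons p rest ih =>
      rw [Fsum, pairSum, ih (List.Pairwise.of_cons h),
          map_pw_of_le p rest (fun q hq => List.rel_of_pairwise_cons h hq)]

-- all cross-pairs between the already-seen points and the remaining points
def cross (seen l : List (Int × Int)) : Int :=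
  (l.map (fun p => (seen.map (pw p)).sum)).sum

lemma cross_append (seen l : List (Int × Int)) (p : Int × Int) :
    cross (seen ++ [p]) l = cross seen l + (l.map (pw p)).sum := by
  induction l with
  | nil => simp [cross]
  | cons r t ih =>
      have hc : ∀ s : List (Int × Int), cross s (r :: t) = (s.map (pw r)).sum + cross s t := by
        intro s; simp [cross]
      rw [hc, hc, ih, List.map_append, List.sum_append, List.map_cons, List.sum_cons,
        List.map_nil, List.sum_nil, List.map_cons, List.sum_cons, pw_comm r p]
      ring

lemma fold_seen (l : List (Int × Int)) :
    ∀ (tot : Int) (seen : List (Int × Int)),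
    (l.foldl stepP (tot, seen)).1 = tot + cross seen l + pairSum l := by
  induction l with
  | nil => intro tot seen; simp [cross, pairSum]
  | cons p t ih =>
      intro tot seen
      simp only [List.foldl_cons, stepP]
      rw [PySem.List.foldl_add seen (pw p) tot, ih, cross_append]
      simp only [cross, pairSum, List.map_cons, List.sum_cons]
      ring

lemma pvRange_split (a : Int) (ha : 0 ≤ a) :
    PySem.List.pyRange a (-1) (-1) = PySem.List.pyRange a 0 (-1) ++ [0] := by
  rw [PySem.List.pyRange_neg_one, PySem.List.pyRange_neg_one]
  have h1 : (a - (-1)).toNat = a.toNat + 1 := by omega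
  have h2 : (a - 0).toNat = a.toNat := by omega
  rw [h1, h2, List.range_succ, List.map_append]
  simp [Int.toNat_of_nonneg ha]

lemma pvRange_shift (a b : Int) :
    (PySem.List.pyRange a b (-1)).map (· - 1) = PySem.List.pyRange (a - 1) (b - 1) (-1) := by
  rw [PySem.List.pyRange_neg_one, PySem.List.pyRange_neg_one, List.map_map]
  have h : (a - 1 - (b - 1)).toNat = (a - b).toNat := by omega
  rw [h]
  exact List.map_congr_left (fun k _ => by simp only [Function.comp_apply]; omega)

lemma pvGetD_cons_shift (a : Int) (H : List Int) (i d : Int) (h : 1 ≤ i) :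
    PySem.List.pyGetD (a :: H) i d = PySem.List.pyGetD H (i - 1) d := by
  rw [PySem.List.pyGetD_of_nonneg _ _ (by omega : (0:Int) ≤ i),
      PySem.List.pyGetD_of_nonneg _ _ (by omega : (0:Int) ≤ i - 1)]
  have e : i.toNat = (i - 1).toNat + 1 := by omega
  rw [e, List.getD_cons_succ]

lemma pvGetD_one (a c : Int) (t : List Int) :
    PySem.List.pyGetD (a :: c :: t) 1 0 = c := by
  rw [pvGetD_cons_shift _ _ _ _ (le_refl 1)]
  norm_num [PySem.List.pyGetD_zero]

lemma stepA_shift (a b : Int) (H Xl : List Int) (st : Int × Int × Int) (i : Int) (h : 1 ≤ i) :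
    stepA (a :: H) (b :: Xl) st i = stepA H Xl st (i - 1) := by
  have e1 : PySem.List.pyGetD (a :: H) (i + 1) 0 = PySem.List.pyGetD H (i - 1 + 1) 0 := by
    rw [pvGetD_cons_shift _ _ _ _ (by omega)]; congr 1; ring
  have e2 : PySem.List.pyGetD (b :: Xl) (i + 1) 0 = PySem.List.pyGetD Xl (i - 1 + 1) 0 := by
    rw [pvGetD_cons_shift _ _ _ _ (by omega)]; congr 1; ring
  have e3 : PySem.List.pyGetD (a :: H) i 0 = PySem.List.pyGetD H (i - 1) 0 :=
    pvGetD_cons_shift _ _ _ _ h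
  have e4 : PySem.List.pyGetD (b :: Xl) i 0 = PySem.List.pyGetD Xl (i - 1) 0 :=
    pvGetD_cons_shift _ _ _ _ h
  simp only [stepA, e1, e2, e3, e4]

lemma foldA_shift (a b : Int) (H Xl : List Int) (l : List Int) (hl : ∀ i ∈ l, 1 ≤ i) (st : Int × Int × Int) :
    l.foldl (stepA (a :: H) (b :: Xl)) st = (l.map (· - 1)).foldl (stepA H Xl) st := by
  rw [List.foldl_map]
  exact PySem.List.foldl_congr_mem l _ _ st (fun acc x hx => stepA_shift a b H Xl acc x (hl x hx))

lemma inner_a (ps : List (Int × Int)) :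
    2 ≤ ps.length → ∀ ss : Int,
    (PySem.List.pyRange ((ps.length : Int) - 2) (-1) (-1)).foldl
        (stepA (ps.map Prod.fst) (ps.map Prod.snd)) (0, 0, ss)
      = (sumH ps.tail, sumHX ps.tail, PySem.Int.mod (ss + Fsum ps) 1000000009) := by
  induction ps with
  | nil => intro h; simp at h
  | cons p rest ih =>
      intro hlen ss
      match rest, ih with
      | q :: rest', ih =>
        have harith : ((p :: q :: rest').length : Int) - 2 = ((q :: rest').length : Int) - 1 := by
          simp only [List.length_cons]; omega
        rw [harith, pvRange_split _ (by simp only [List.length_cons]; omega), List.foldl_append]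
        simp only [List.map_cons]
        rw [foldA_shift p.1 p.2 _ _ (PySem.List.pyRange (((q :: rest').length : Int) - 1) 0 (-1))
              (fun i hi => by have := PySem.List.mem_pyRange_neg_one.mp hi; omega) _,
            pvRange_shift]
        have harith2 : ((q :: rest').length : Int) - 1 - 1 = ((q :: rest').length : Int) - 2 := by ring
        have harith3 : (0 : Int) - 1 = -1 := by ring
        rw [harith2, harith3]
        cases rest' with
        | nil =>
            rw [PySem.List.pyRange_neg_one_eq_nil (by simp)]
            simp only [List.foldl_nil, List.foldl_cons]
            simp only [stepA, zero_add, pvGetD_one, PySem.List.pyGetD_zero_cons]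
            simp only [Fsum, sumH, sumHX, List.map_cons, List.map_nil, List.sum_cons,
              List.sum_nil, List.tail_cons]
            refine Prod.ext (by ring) (Prod.ext (by ring) ?_)
            simp only []
            congr 1
            ring
        | cons q2 rest'' =>
            simp only [List.map_cons] at ih ⊢
            rw [ih (by simp) ss]
            simp only [List.foldl_cons, List.foldl_nil]
            simp only [stepA, zero_add, pvGetD_one, PySem.List.pyGetD_zero_cons]
            refine Prod.ext ?_ (Prod.ext ?_ ?_)
            · simp only [sumH, List.tail_cons, List.map_cons, List.sum_cons]; ring
            · simp only [sumHX, List.tail_cons, List.map_cons, List.sum_cons]; ring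
            · simp only []
              rw [PySem.Int.mod_eq_emod_of_pos (by norm_num),
                  PySem.Int.mod_eq_emod_of_pos (by norm_num),
                  PySem.Int.mod_eq_emod_of_pos (by norm_num),
                  add_sub_assoc, Int.emod_add_emod]
              congr 1
              simp only [Fsum, sumH, sumHX, List.map_cons, List.sum_cons, List.tail_cons]
              ring

lemma pvCols_col (rows : List (List Int)) (i : Int) (h0 : 0 ≤ i) (hne : rows ≠ [])
    (hlen : ∀ r ∈ rows, i < (r.length : Int)) :
    PySem.List.pyGetD (pvCols rows) i [] = rows.map (fun r => r.getD i.toNat 0) := by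
  obtain ⟨m, hmin⟩ : ∃ m, (rows.map List.length).min? = some m := by
    cases h : (rows.map List.length).min? with
    | none =>
        exfalso
        have := List.min?_eq_none_iff.mp h
        simp only [List.map_eq_nil_iff] at this
        exact hne this
    | some m => exact ⟨m, rfl⟩
  have hmem : m ∈ rows.map List.length := List.min?_mem hmin
  obtain ⟨r, hr, hrl⟩ := List.mem_map.mp hmem
  have him : i.toNat < m := by have := hlen r hr; omega
  unfold pvCols
  rw [hmin]
  rw [PySem.List.pyGetD_eq_getElem _ _ h0
        (by simp only [Option.getD_some, List.length_map, List.length_range]; omega)]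
  simp

lemma foldl_rel {α σ τ : Type} (R : σ → τ → Prop) (f : σ → α → σ) (g : τ → α → τ) :
    ∀ (l : List α) (s : σ) (t : τ),
      (∀ a ∈ l, ∀ s t, R s t → R (f s a) (g t a)) → R s t → R (l.foldl f s) (l.foldl g t) := by
  intro l
  induction l with
  | nil => intro s t _ h; simpa using h
  | cons a l ih =>
      intro s t hstep h
      exact ih _ _ (fun b hb => hstep b (List.mem_cons_of_mem a hb))
        (hstep a List.mem_cons_self s t h)

lemma dim_step (X : List (List Int)) (k : Int) (hk : 0 ≤ k) (hne : X ≠ [])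
    (hlen : ∀ r ∈ X, k + 2 ≤ (r.length : Int)) (ss tot : Int)
    (hR : ss = PySem.Int.mod tot 1000000009) :
    ((PySem.List.pyRange ((X.length : Int) - 2) (-1) (-1)).foldl
        (stepA
          (PySem.List.pyGetD (pvCols (PySem.List.sorted X (fun r => PySem.List.pyGetD r (k + 1) 0))) 0 [])
          (PySem.List.pyGetD (pvCols (PySem.List.sorted X (fun r => PySem.List.pyGetD r (k + 1) 0))) (k + 1) []))
        (0, 0, ss)).2.2
      = PySem.Int.mod ((X.foldl (stepB k) (tot, [])).1) 1000000009 := by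
  set key : List Int → Int := fun r => PySem.List.pyGetD r (k + 1) 0 with hkey
  set srt := PySem.List.sorted X key with hsrt
  set pairf : List Int → Int × Int :=
    fun r => (PySem.List.pyGetD r 0 0, PySem.List.pyGetD r (k + 1) 0) with hpairf
  have hslen : srt.length = X.length := PySem.List.length_sorted X _ false
  have hsne : srt ≠ [] := by
    intro h; apply hne; apply List.length_eq_zero_iff.mp; rw [← hslen, h]; rfl
  have hrl : ∀ r ∈ srt, k + 2 ≤ (r.length : Int) :=
    fun r hr => hlen r ((PySem.List.mem_sorted X _ false r).mp hr)
  set ps := srt.map pairf with hps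
  set psX := X.map pairf with hpsX
  -- B's side: plain fold = tot + pairSum psX
  have hBfold : (X.foldl (stepB k) (tot, [])).1 = tot + pairSum psX := by
    have : X.foldl (stepB k) (tot, ([] : List (Int × Int))) = psX.foldl stepP (tot, []) := by
      rw [hpsX, List.foldl_map]; rfl
    rw [this, fold_seen psX tot []]
    simp [cross]
  -- pairSum is permutation-invariant, and ps is sorted by second component
  have hperm : ps.Perm psX := (PySem.List.sorted_perm X key false).map pairf
  have hsortpw : ps.Pairwise (fun p q => p.2 ≤ q.2) := by
    have h0 : srt.Pairwise (fun a b => key a ≤ key b) := PySem.List.sorted_pairwise X key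
    rw [hps, List.pairwise_map]
    exact h0.imp (fun h => h)
  have hFP : Fsum ps = pairSum psX := by
    rw [Fsum_eq_pairSum ps hsortpw]; exact pairSum_perm hperm
  -- A's side columns
  have hpslen : ps.length = X.length := by rw [hps, List.length_map, hslen]
  have col0 : PySem.List.pyGetD (pvCols srt) 0 [] = ps.map Prod.fst := by
    rw [pvCols_col srt 0 le_rfl hsne (fun r hr => by have := hrl r hr; omega), hps, List.map_map]
    refine List.map_congr_left (fun r _ => ?_)
    simp [hpairf, PySem.List.pyGetD_zero]
  have colk : PySem.List.pyGetD (pvCols srt) (k + 1) [] = ps.map Prod.snd := by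
    rw [pvCols_col srt (k + 1) (by omega) hsne (fun r hr => by have := hrl r hr; omega), hps,
        List.map_map]
    refine List.map_congr_left (fun r _ => ?_)
    simp [hpairf, PySem.List.pyGetD_of_nonneg _ _ (by omega : (0:Int) ≤ k + 1)]
  rcases Nat.lt_or_ge X.length 2 with hsmall | hbig
  · have h1 : X.length = 1 := by
      have : X.length ≠ 0 := fun h => hne (List.length_eq_zero_iff.mp h)
      omega
    rw [PySem.List.pyRange_neg_one_eq_nil (by rw [h1]; norm_num), List.foldl_nil, hBfold, ← hFP]
    obtain ⟨p, hp⟩ := List.length_eq_one_iff.mp (by rw [hpslen, h1] : ps.length = 1)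
    rw [hp, hR, PySem.Int.mod_eq_emod_of_pos (by norm_num),
        PySem.Int.mod_eq_emod_of_pos (by norm_num)]
    simp [Fsum, sumH, sumHX]
  · have h2 : 2 ≤ ps.length := by omega
    have hrw : ((X.length : Int) - 2) = ((ps.length : Int) - 2) := by rw [hpslen]
    rw [hrw, col0, colk, inner_a ps h2 ss, hBfold, ← hFP, hR]
    simp only []
    rw [PySem.Int.mod_eq_emod_of_pos (by norm_num), PySem.Int.mod_eq_emod_of_pos (by norm_num),
        PySem.Int.mod_eq_emod_of_pos (by norm_num), Int.emod_add_emod]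

-- ===== VERDICT (by name: the statement is the Claim_ definition above) =====
theorem calculate_ss_spec : Claim_equal_calculate_ss := by
  intro X d _ hpre
  unfold Spec_calculate_ss calculate_ss calculate_ss_alt
  refine foldl_rel (fun ss tot => ss = PySem.Int.mod tot 1000000009) _ _
    (PySem.List.pyRange 0 d 1) 0 0 ?_ (by norm_num [PySem.Int.mod])
  intro k hk ss tot hR
  have hk' := PySem.List.mem_pyRange_one.mp hk
  rcases hpre with hd | ⟨hne, hlen⟩
  · omega
  · exact dim_step X k hk'.1 hne (fun r hr => by have := hlen r hr; omega) ss tot hR
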